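-- pv_equiv track=rewrite | github.com/sandervandorsten/aivd-kerstpuzzel-2022 | aivd_2022/exercise11/exercise11.py | add_missing_data
-- ===== SOURCE A (Python) =====
-- def replace(words: dict[str, list[str]], col: str, alt: str, col_i: int, alt_i: int):
--     if col_i > 5 or alt_i > 5:
--         raise ValueError("Index to High")
--     return [
--         col[:col_i] + alt[alt_i] + col[col_i + 1 :]
--         for col, alt in zip(words[col], words[alt])
--     ]
--
-- def add_missing_data(words_: dict[str, list[str]], columns, cols_with_data):
--     """add in data for which we didn't fill using the solver"""
--     for col in sorted(list(set(columns) - set(cols_with_data))):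
--         if col == "d":
--             # replace d2 with c2
--             words_[col] = replace(words_, col=col, alt="c", col_i=1, alt_i=1)
--             # replace d4 with a3
--             words_[col] = replace(words_, col=col, alt="a", col_i=3, alt_i=2)
--             # replace d5 with a3
--             words_[col] = replace(words_, col=col, alt="a", col_i=4, alt_i=2)
--         elif col == "e":
--             # replace e1 with a3
--             words_[col] = replace(words_, col=col, alt="a", col_i=0, alt_i=2)
--             # replace e3 with a1
--             words_[col] = replace(words_, col=col, alt="a", col_i=2, alt_i=0)
--             # replace e4 with a3
--             words_[col] = replace(words_, col=col, alt="a", col_i=3, alt_i=2)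
--         elif col == "f":
--             # replace f5 with a5
--             words_[col] = replace(words_, col=col, alt="a", col_i=4, alt_i=4)
--         elif col == "g":
--             # replace g1 with a1
--             words_[col] = replace(words_, col=col, alt="a", col_i=0, alt_i=0)
--             # replace g2 with a3
--             words_[col] = replace(words_, col=col, alt="a", col_i=1, alt_i=2)
--             # replace g3 with c2
--             words_[col] = replace(words_, col=col, alt="c", col_i=2, alt_i=1)
--     return words_
-- ===== SOURCE B (Python) =====
-- RULES = {
--     "d": [("c", 1, 1), ("a", 3, 2), ("a", 4, 2)],
--     "e": [("a", 0, 2), ("a", 2, 0), ("a", 3, 2)],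
--     "f": [("a", 4, 4)],
--     "g": [("a", 0, 0), ("a", 1, 2), ("c", 2, 1)],
-- }
--
--
-- def add_missing_data(words_, columns, cols_with_data):
--     """add in data for which we didn't fill using the solver"""
--     for col in sorted(set(columns) - set(cols_with_data)):
--         rules = RULES.get(col)
--         if rules:
--             alts = [words_[alt] for alt, _, _ in rules]
--             new_words = []
--             for tup in zip(words_[col], *alts):
--                 w = tup[0]
--                 for (_, ci, ai), aw in zip(rules, tup[1:]):
--                     w = w[:ci] + aw[ai] + w[ci + 1:]
--                 new_words.append(w)
--             words_[col] = new_words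
--     return words_
-- ===== Notes on version B (the rewrite author's own statement) =====
-- stated objective: alternative
-- what changed: A hardcodes four if/elif branches each chaining one-to-three separate replace() passes that rebuild the column's word list once per edit; B drives a RULES data table and rebuilds each edited column in a single fused pass that zips the column with all its alt columns and splices every substituted character while assembling each word once.
import Mathlib
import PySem

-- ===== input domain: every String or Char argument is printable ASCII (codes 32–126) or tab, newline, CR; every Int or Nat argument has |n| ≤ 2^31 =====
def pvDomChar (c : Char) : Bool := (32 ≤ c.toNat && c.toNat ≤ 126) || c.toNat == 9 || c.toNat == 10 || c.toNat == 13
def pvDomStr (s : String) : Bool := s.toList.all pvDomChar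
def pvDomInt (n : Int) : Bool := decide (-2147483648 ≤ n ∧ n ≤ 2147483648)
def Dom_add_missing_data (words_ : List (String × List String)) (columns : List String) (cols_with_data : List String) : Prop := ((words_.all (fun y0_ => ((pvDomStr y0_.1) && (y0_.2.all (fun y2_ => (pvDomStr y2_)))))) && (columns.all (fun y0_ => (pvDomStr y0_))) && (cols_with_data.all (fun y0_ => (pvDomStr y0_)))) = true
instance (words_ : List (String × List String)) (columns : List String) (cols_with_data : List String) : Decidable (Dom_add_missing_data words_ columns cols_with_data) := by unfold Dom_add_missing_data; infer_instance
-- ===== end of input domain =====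

-- B replaces A's hardcoded chain of per-column `replace` passes (three list rebuilds per column)
-- by a data table of edit rules and ONE fused pass per column over zip(words_[col], *alt columns).
-- Both Pythons mutate the words_ dict in place and return it; the theorems are about the returned value.

-- ===== PORT A =====

-- the spliced word  col[:col_i] + alt[alt_i] + col[col_i+1:]  (the same expression occurs verbatim in both Pythons)
def pvSubst? (w : String) (ci : Int) (a : String) (ai : Int) : Option String :=
  (PySem.Str.pyGet? a ai).map (fun ch =>
    String.ofList (PySem.List.slice w.toList none (some ci) ++ [ch] ++
                   PySem.List.slice w.toList (some (ci + 1)) none))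

-- Python helper `replace`; none = the ValueError / KeyError / IndexError cases
def replaceA (words : PySem.Dict String (List String)) (col alt : String) (col_i alt_i : Int) :
    Option (List String) :=
  if col_i > 5 ∨ alt_i > 5 then none
  else
    match words.get? col, words.get? alt with
    | some ws, some alts => (ws.zip alts).mapM (fun p => pvSubst? p.1 col_i p.2 alt_i)
    | _, _ => none

-- the three statements 'words_[col] = replace(words_, col, alt_i, …)' that make up each of
-- A's "d"/"e"/"g" branches (the dict reassignment after each replace, as in the Python)
def chainA3 (w : PySem.Dict String (List String)) (col : String)
    (alt1 : String) (c1 a1 : Int) (alt2 : String) (c2 a2 : Int) (alt3 : String) (c3 a3 : Int) :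
    Option (PySem.Dict String (List String)) :=
  (replaceA w col alt1 c1 a1).bind fun l1 =>
  let w1 := w.insert col l1
  (replaceA w1 col alt2 c2 a2).bind fun l2 =>
  let w2 := w1.insert col l2
  (replaceA w2 col alt3 c3 a3).map fun l3 => w2.insert col l3

-- one iteration of A's `for col in sorted(...)` body
def stepA (w : PySem.Dict String (List String)) (col : String) :
    Option (PySem.Dict String (List String)) :=
  if col = "d" then chainA3 w col "c" 1 1 "a" 3 2 "a" 4 2
  else if col = "e" then chainA3 w col "a" 0 2 "a" 2 0 "a" 3 2
  else if col = "f" then (replaceA w col "a" 4 4).map fun l1 => w.insert col l1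
  else if col = "g" then chainA3 w col "a" 0 0 "a" 1 2 "c" 2 1
  else some w

-- sorted(set(columns) - set(cols_with_data))  (shared line of both Pythons)
def pvDiffCols (columns cols_with_data : List String) : List String :=
  PySem.List.sorted
    (PySem.Set.diff (PySem.Set.ofList columns) (PySem.Set.ofList cols_with_data))
    (fun x => x) false

def add_missing_data (words_ : List (String × List String)) (columns : List String) (cols_with_data : List String) : List (String × List String) :=
  (((pvDiffCols columns cols_with_data).foldl
      (fun od col => od.bind (fun d => stepA d col))
      (some (PySem.Dict.mk words_))).getD (PySem.Dict.mk words_)).items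

-- ===== PORT B =====

-- module-level table RULES of Source B
def pvRULES : PySem.Dict String (List (String × Int × Int)) :=
  PySem.Dict.mk
    [("d", [("c", 1, 1), ("a", 3, 2), ("a", 4, 2)]),
     ("e", [("a", 0, 2), ("a", 2, 0), ("a", 3, 2)]),
     ("f", [("a", 4, 4)]),
     ("g", [("a", 0, 0), ("a", 1, 2), ("c", 2, 1)])]

-- zip(l1, l2, …) of a non-empty family of lists, as rows
def pyZipStar {α : Type} : List (List α) → List (List α)
  | [] => []
  | [l] => l.map (fun x => [x])
  | l :: ls => List.zipWith (· :: ·) l (pyZipStar ls)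

-- Source B's inner loop: w = tup[0]; for (_, ci, ai), aw in zip(rules, tup[1:]): splice
def rowApply (rules : List (String × Int × Int)) (row : List String) : Option String :=
  match row with
  | [] => none
  | w :: aws => (rules.zip aws).foldlM (fun acc r => pvSubst? acc r.1.2.1 r.2 r.1.2.2) w

-- one iteration of Source B's loop body
def stepB (w : PySem.Dict String (List String)) (col : String) :
    Option (PySem.Dict String (List String)) :=
  match pvRULES.get? col with
  | none => some w
  | some rules =>
    if rules.isEmpty then some w
    else
      (rules.mapM (fun r => w.get? r.1)).bind fun alts =>
      (w.get? col).bind fun ws =>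
      ((pyZipStar (ws :: alts)).mapM (rowApply rules)).map fun nw => w.insert col nw

def add_missing_data_alt (words_ : List (String × List String)) (columns : List String) (cols_with_data : List String) : List (String × List String) :=
  (((pvDiffCols columns cols_with_data).foldl
      (fun od col => od.bind (fun d => stepB d col))
      (some (PySem.Dict.mk words_))).getD (PySem.Dict.mk words_)).items

-- ===== PRECONDITION & SPEC =====

-- Pre-side copy of the edit table (the closure of Pre_ may not reach the ports)
def pvRulesFor (col : String) : List (String × Int × Int) :=
  if col = "d" then [("c", 1, 1), ("a", 3, 2), ("a", 4, 2)]
  else if col = "e" then [("a", 0, 2), ("a", 2, 0), ("a", 3, 2)]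
  else if col = "f" then [("a", 4, 4)]
  else if col = "g" then [("a", 0, 0), ("a", 1, 2), ("c", 2, 1)]
  else []

-- every alt column named by the rules is a key, and — tracking only list LENGTHS through the
-- chain (rule k pairs up indices below the running minimum of the lengths seen so far) — every
-- alt word that actually gets indexed is long enough at its index
def pvOkRules (d : PySem.Dict String (List String)) :
    List (String × Int × Int) → Nat → Bool
  | [], _ => true
  | (alt, _, ai) :: rs, L =>
    match d.get? alt with
    | none => false
    | some a =>
      decide (∀ k, k < min L a.length →
        PySem.Raise.InRange ((a.getD k "").toList.length) ai) && pvOkRules d rs (min L a.length)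

def pvPreCol (d : PySem.Dict String (List String)) (col : String) : Bool :=
  match d.get? col with
  | none => false
  | some ws => pvOkRules d (pvRulesFor col) ws.length

-- exactly the inputs on which the Python A returns normally: for each edited column that is in
-- columns but not in cols_with_data, its key and the alt keys exist (else KeyError) and every
-- alt character actually indexed exists (else IndexError)
def Pre_add_missing_data (words_ : List (String × List String)) (columns : List String) (cols_with_data : List String) : Prop :=
  ∀ col ∈ (["d", "e", "f", "g"] : List String),
    col ∈ columns → col ∉ cols_with_data → pvPreCol (PySem.Dict.mk words_) col = true
instance (words_ : List (String × List String)) (columns : List String) (cols_with_data : List String) : Decidable (Pre_add_missing_data words_ columns cols_with_data) := by unfold Pre_add_missing_data; infer_instance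

def pvWitness_add_missing_data : (List (String × List String)) × List String × List String :=
  ([("a", ["laser"]), ("c", ["radar"]), ("d", ["xxxxx"])], ["d", "q"], ["q"])

def Spec_add_missing_data (words_ : List (String × List String)) (columns : List String) (cols_with_data : List String) (out : List (String × List String)) : Prop := out = add_missing_data_alt words_ columns cols_with_data
instance (words_ : List (String × List String)) (columns : List String) (cols_with_data : List String) (out : List (String × List String)) : Decidable (Spec_add_missing_data words_ columns cols_with_data out) := by unfold Spec_add_missing_data; infer_instance

-- ===== CLAIM (what is proved, stated in full; the proofs are below) =====
def Claim_equal_add_missing_data : Prop := ∀ (words_ : List (String × List String)) (columns : List String) (cols_with_data : List String), Dom_add_missing_data words_ columns cols_with_data → Pre_add_missing_data words_ columns cols_with_data → Spec_add_missing_data words_ columns cols_with_data (add_missing_data words_ columns cols_with_data)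

-- ===== LEMMAS AND PROOFS =====

-- total version of the splice (defined wherever pvSubst? is some)
def pvSubstD (w : String) (ci : Int) (a : String) (ai : Int) : String :=
  (pvSubst? w ci a ai).getD w

-- A's sequential application of a chain of rules (alt lists already looked up)
def seqApp : List (String × Int × Int) → List (List String) → List String → Option (List String)
  | [], _, ws => some ws
  | _, [], ws => some ws
  | (_, ci, ai) :: rs, a :: as_, ws =>
    ((ws.zip a).mapM (fun p => pvSubst? p.1 ci p.2 ai)).bind (seqApp rs as_)

-- success of every alt-character lookup the chain performs
def okChain : List (String × Int × Int) → List (List String) → Nat → Prop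
  | [], _, _ => True
  | _, [], _ => True
  | (_, _, ai) :: rs, a :: as_, L =>
    (∀ k, k < min L a.length → (PySem.Str.pyGet? (a.getD k "") ai).isSome = true) ∧
      okChain rs as_ (min L a.length)

lemma subst?_eq_some (w a : String) (ci ai : Int) (h : (PySem.Str.pyGet? a ai).isSome = true) :
    pvSubst? w ci a ai = some (pvSubstD w ci a ai) := by
  rcases Option.isSome_iff_exists.mp h with ⟨c, hc⟩
  unfold pvSubstD pvSubst?
  rw [hc]; simp

lemma mapM_zip_subst (ci ai : Int) : ∀ (ws a : List String),
    (∀ k, k < min ws.length a.length → (PySem.Str.pyGet? (a.getD k "") ai).isSome = true) →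
    (ws.zip a).mapM (fun p => pvSubst? p.1 ci p.2 ai) =
      some (List.zipWith (fun w x => pvSubstD w ci x ai) ws a) := by
  intro ws
  induction ws with
  | nil => intro a _; simp
  | cons w ws ih =>
    intro a h
    cases a with
    | nil => simp
    | cons a0 a =>
      have h0 := h 0 (by simp)
      rw [List.zip_cons_cons, List.mapM_cons, subst?_eq_some w a0 ci ai (by simpa using h0)]
      rw [ih a (fun k hk => by
        simpa using h (k+1) (by simp only [List.length_cons, Nat.succ_min_succ]; omega))]
      simp

lemma zipWith_cons_replicate (l : List String) : ∀ (n : Nat), l.length ≤ n →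
    List.zipWith (· :: ·) l (List.replicate n ([] : List String)) = l.map (fun x => [x]) := by
  induction l with
  | nil => intro n _; simp
  | cons x l ih =>
    intro n hn
    cases n with
    | zero => simp at hn
    | succ n => simp [List.replicate_succ, ih n (by simpa using hn)]

lemma zipRow (rs : List (String × Int × Int)) (alt : String) (ci ai : Int) :
    ∀ (ws a : List String) (tails : List (List String)),
    (∀ k, k < min ws.length a.length → (PySem.Str.pyGet? (a.getD k "") ai).isSome = true) →
    (List.zipWith (· :: ·) ws (List.zipWith (· :: ·) a tails)).mapM (rowApply ((alt, ci, ai) :: rs)) =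
      (List.zipWith (· :: ·) (List.zipWith (fun w x => pvSubstD w ci x ai) ws a) tails).mapM
        (rowApply rs) := by
  intro ws
  induction ws with
  | nil => intro a tails _; simp
  | cons w ws ih =>
    intro a tails h
    cases a with
    | nil => simp
    | cons a0 a =>
      cases tails with
      | nil => simp
      | cons t ts =>
        have h0 := h 0 (by simp)
        simp only [List.zipWith_cons_cons, List.mapM_cons]
        have hrow : rowApply ((alt, ci, ai) :: rs) (w :: a0 :: t) =
            rowApply rs (pvSubstD w ci a0 ai :: t) := by
          simp only [rowApply, List.zip_cons_cons, List.foldlM_cons]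
          rw [subst?_eq_some w a0 ci ai (by simpa using h0)]
          rfl
        rw [hrow, ih a ts (fun k hk => by
          simpa using h (k+1) (by simp only [List.length_cons, Nat.succ_min_succ]; omega))]

lemma mapM_rowApply_nil : ∀ (l : List String),
    (l.map (fun x => [x])).mapM (rowApply []) = some l := by
  intro l
  induction l with
  | nil => simp
  | cons x l ih => simp [rowApply, ih]

lemma fusion : ∀ (rs : List (String × Int × Int)) (alts : List (List String)) (ws : List String),
    alts.length = rs.length → okChain rs alts ws.length →
    seqApp rs alts ws = (pyZipStar (ws :: alts)).mapM (rowApply rs) := by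
  intro rs
  induction rs with
  | nil =>
    intro alts ws hlen _
    have : alts = [] := List.eq_nil_of_length_eq_zero hlen
    subst this
    simp only [seqApp, pyZipStar]
    rw [mapM_rowApply_nil]
  | cons r rs ih =>
    obtain ⟨alt, ci, ai⟩ := r
    intro alts ws hlen hok
    cases alts with
    | nil => simp at hlen
    | cons a alts =>
      obtain ⟨h1, h2⟩ := hok
      have h1' : ∀ k, k < min ws.length a.length →
          (PySem.Str.pyGet? (a.getD k "") ai).isSome = true := h1
      have hseq : seqApp ((alt, ci, ai) :: rs) (a :: alts) ws =
          seqApp rs alts (List.zipWith (fun w x => pvSubstD w ci x ai) ws a) := by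
        simp only [seqApp]
        rw [mapM_zip_subst ci ai ws a h1']
        rfl
      rw [hseq]
      have hlen' : (List.zipWith (fun w x => pvSubstD w ci x ai) ws a).length =
          min ws.length a.length := by simp
      rw [ih alts _ (by simpa using hlen) (by rw [hlen']; exact h2)]
      cases alts with
      | nil =>
        have : rs = [] := by simpa using hlen
        subst this
        show (pyZipStar (List.zipWith (fun w x => pvSubstD w ci x ai) ws a :: [])).mapM (rowApply []) =
          (pyZipStar (ws :: a :: [])).mapM (rowApply ((alt, ci, ai) :: []))
        simp only [pyZipStar]
        rw [← zipWith_cons_replicate a a.length (le_refl _),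
            zipRow [] alt ci ai ws a _ h1',
            zipWith_cons_replicate _ a.length (by simp),
            mapM_rowApply_nil]
      | cons a2 alts =>
        show (pyZipStar (_ :: a2 :: alts)).mapM (rowApply rs) =
          (pyZipStar (ws :: a :: a2 :: alts)).mapM _
        simp only [pyZipStar]
        rw [zipRow rs alt ci ai ws a _ h1']

lemma seqApp_some : ∀ (rs : List (String × Int × Int)) (alts : List (List String)) (ws : List String),
    okChain rs alts ws.length → ∃ s, seqApp rs alts ws = some s := by
  intro rs
  induction rs with
  | nil => intro alts ws _; exact ⟨ws, rfl⟩
  | cons r rs ih =>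
    obtain ⟨alt, ci, ai⟩ := r
    intro alts ws hok
    cases alts with
    | nil => exact ⟨ws, rfl⟩
    | cons a alts =>
      obtain ⟨h1, h2⟩ := hok
      obtain ⟨s, hs⟩ := ih alts (List.zipWith (fun w x => pvSubstD w ci x ai) ws a)
        (by rw [List.length_zipWith]; exact h2)
      refine ⟨s, ?_⟩
      simp only [seqApp]
      rw [mapM_zip_subst ci ai ws a h1]
      simpa using hs

-- extracting the lookups and the okChain condition from the Boolean precondition
lemma okRules_extract (d : PySem.Dict String (List String)) :
    ∀ (rs : List (String × Int × Int)) (L : Nat), pvOkRules d rs L = true →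
    ∃ alts, rs.mapM (fun r => d.get? r.1) = some alts ∧ alts.length = rs.length ∧
      okChain rs alts L := by
  intro rs
  induction rs with
  | nil => intro L _; exact ⟨[], by simp, by simp, trivial⟩
  | cons r rs ih =>
    obtain ⟨alt, ci, ai⟩ := r
    intro L h
    simp only [pvOkRules] at h
    cases hga : d.get? alt with
    | none => rw [hga] at h; simp at h
    | some a =>
      rw [hga] at h
      simp only [Bool.and_eq_true, decide_eq_true_eq] at h
      obtain ⟨hrange, hrest⟩ := h
      obtain ⟨alts, hmap, hlen, hok⟩ := ih (min L a.length) hrest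
      refine ⟨a :: alts, ?_, by simpa using hlen, ?_⟩
      · rw [List.mapM_cons, hga, hmap]; rfl
      · refine ⟨fun k hk => ?_, hok⟩
        have hr := hrange k hk
        cases hget : PySem.List.pyGet? (a.getD k "").toList ai with
        | none => exact absurd hr ((PySem.List.pyGet?_eq_none_iff _ _).mp hget)
        | some ch => simp only [PySem.Str.pyGet?, PySem.Chars.pyGet?, hget, Option.isSome_some]

lemma okRules_insert (d : PySem.Dict String (List String)) (k : String) (v : List String) :
    ∀ (rs : List (String × Int × Int)) (L : Nat), (∀ r ∈ rs, r.1 ≠ k) →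
    pvOkRules (d.insert k v) rs L = pvOkRules d rs L := by
  intro rs
  induction rs with
  | nil => intro L _; rfl
  | cons r rs ih =>
    obtain ⟨alt, ci, ai⟩ := r
    intro L h
    have hne : alt ≠ k := h (alt, ci, ai) (by simp)
    simp only [pvOkRules, PySem.Dict.get?_insert_of_ne _ _ hne]
    cases d.get? alt with
    | none => rfl
    | some a =>
      dsimp only
      rw [ih _ (fun r hr => h r (by simp [hr]))]

lemma preCol_insert (d : PySem.Dict String (List String)) (k : String) (v : List String)
    (c : String) (hc : c ∈ (["d", "e", "f", "g"] : List String))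
    (h1 : c ≠ k) (ha : k ≠ "a") (hx : k ≠ "c") :
    pvPreCol (d.insert k v) c = pvPreCol d c := by
  have hac : ∀ r ∈ pvRulesFor c, r.1 = "a" ∨ r.1 = "c" := by fin_cases hc <;> decide
  have halt : ∀ r ∈ pvRulesFor c, r.1 ≠ k := fun r hr he => by
    rcases hac r hr with h | h
    · exact ha (he ▸ h)
    · exact hx (he ▸ h)
  simp only [pvPreCol, PySem.Dict.get?_insert_of_ne _ _ h1]
  cases d.get? c with
  | none => rfl
  | some ws =>
    dsimp only
    rw [okRules_insert d k v _ _ halt]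

-- A's chain of three replace-and-reassign statements, as seqApp (no success assumptions)
lemma chain3_eq (d : PySem.Dict String (List String)) (c alt1 alt2 alt3 : String)
    (c1 a1 c2 a2 c3 a3 : Int) (ws l1 l2 l3 : List String)
    (hne2 : alt2 ≠ c) (hne3 : alt3 ≠ c)
    (hlt1 : ¬(c1 > 5 ∨ a1 > 5)) (hlt2 : ¬(c2 > 5 ∨ a2 > 5)) (hlt3 : ¬(c3 > 5 ∨ a3 > 5))
    (hws : d.get? c = some ws) (h1 : d.get? alt1 = some l1)
    (h2 : d.get? alt2 = some l2) (h3 : d.get? alt3 = some l3) :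
    chainA3 d c alt1 c1 a1 alt2 c2 a2 alt3 c3 a3 =
      (seqApp [(alt1, c1, a1), (alt2, c2, a2), (alt3, c3, a3)] [l1, l2, l3] ws).map
        (d.insert c ·) := by
  simp only [chainA3, replaceA, if_neg hlt1, if_neg hlt2, if_neg hlt3, hws, h1]
  cases m1 : (ws.zip l1).mapM (fun p => pvSubst? p.1 c1 p.2 a1) with
  | none => simp [seqApp, m1]
  | some x1 =>
    simp only [Option.bind_some]
    rw [PySem.Dict.get?_insert_self, PySem.Dict.get?_insert_of_ne _ _ hne2, h2]
    cases m2 : (x1.zip l2).mapM (fun p => pvSubst? p.1 c2 p.2 a2) with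
    | none => simp [seqApp, m1, m2]
    | some x2 =>
      simp only [m2, Option.bind_some]
      rw [PySem.Dict.insert_insert_self, PySem.Dict.get?_insert_self,
        PySem.Dict.get?_insert_of_ne _ _ hne3, h3]
      cases m3 : (x2.zip l3).mapM (fun p => pvSubst? p.1 c3 p.2 a3) with
      | none => simp [seqApp, m1, m2, m3]
      | some x3 =>
        simp only [m3, PySem.Dict.insert_insert_self]
        simp [seqApp, m1, m2, m3]

-- A's single replace-and-reassign (the "f" branch), as seqApp
lemma chain1_eq (d : PySem.Dict String (List String)) (c alt1 : String) (c1 a1 : Int)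
    (ws l1 : List String) (hlt1 : ¬(c1 > 5 ∨ a1 > 5))
    (hws : d.get? c = some ws) (h1 : d.get? alt1 = some l1) :
    (replaceA d c alt1 c1 a1).map (fun l => d.insert c l) =
      (seqApp [(alt1, c1, a1)] [l1] ws).map (d.insert c ·) := by
  simp only [replaceA, if_neg hlt1, hws, h1]
  cases m1 : (ws.zip l1).mapM (fun p => pvSubst? p.1 c1 p.2 a1) <;> simp [seqApp, m1]

lemma stepB_eq (d : PySem.Dict String (List String)) (c : String)
    (rules : List (String × Int × Int)) (alts : List (List String)) (ws : List String)
    (hR : pvRULES.get? c = some rules) (hne : rules.isEmpty = false)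
    (hmap : rules.mapM (fun r => d.get? r.1) = some alts) (hws : d.get? c = some ws) :
    stepB d c = ((pyZipStar (ws :: alts)).mapM (rowApply rules)).map (fun nw => d.insert c nw) := by
  simp only [stepB, hR, hne, hmap, hws, Option.bind_some, Bool.false_eq_true, if_false]

lemma step3_core (d : PySem.Dict String (List String)) (c alt1 alt2 alt3 : String)
    (c1 a1 c2 a2 c3 a3 : Int)
    (hR : pvRULES.get? c = some [(alt1, c1, a1), (alt2, c2, a2), (alt3, c3, a3)])
    (hrf : pvRulesFor c = [(alt1, c1, a1), (alt2, c2, a2), (alt3, c3, a3)])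
    (hA : stepA d c = chainA3 d c alt1 c1 a1 alt2 c2 a2 alt3 c3 a3)
    (hne2 : alt2 ≠ c) (hne3 : alt3 ≠ c)
    (hlt1 : ¬(c1 > 5 ∨ a1 > 5)) (hlt2 : ¬(c2 > 5 ∨ a2 > 5)) (hlt3 : ¬(c3 > 5 ∨ a3 > 5))
    (hpre : pvPreCol d c = true) :
    ∃ v, stepA d c = some (d.insert c v) ∧ stepB d c = some (d.insert c v) := by
  unfold pvPreCol at hpre
  cases hws : d.get? c with
  | none => rw [hws] at hpre; simp at hpre
  | some ws =>
    rw [hws] at hpre; dsimp only at hpre; rw [hrf] at hpre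
    obtain ⟨alts, hmap, hlen, hokc⟩ := okRules_extract d _ ws.length hpre
    have hmap' := hmap
    simp only [List.mapM_cons, List.mapM_nil] at hmap'
    cases hg1 : d.get? alt1 with
    | none => rw [hg1] at hmap'; simp at hmap'
    | some A1 =>
    rw [hg1] at hmap'
    cases hg2 : d.get? alt2 with
    | none => rw [hg2] at hmap'; simp at hmap'
    | some A2 =>
    rw [hg2] at hmap'
    cases hg3 : d.get? alt3 with
    | none => rw [hg3] at hmap'; simp at hmap'
    | some A3 =>
    rw [hg3] at hmap'
    have halts : alts = [A1, A2, A3] := by simpa using hmap'.symm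
    subst halts
    obtain ⟨s, hs⟩ := seqApp_some _ [A1, A2, A3] ws hokc
    refine ⟨s, ?_, ?_⟩
    · rw [hA, chain3_eq d c alt1 alt2 alt3 c1 a1 c2 a2 c3 a3 ws A1 A2 A3 hne2 hne3
        hlt1 hlt2 hlt3 hws hg1 hg2 hg3, hs]
      rfl
    · rw [stepB_eq d c _ [A1, A2, A3] ws hR rfl hmap hws, ← fusion _ _ ws hlen hokc, hs]
      rfl

lemma step1_core (d : PySem.Dict String (List String)) (c alt1 : String) (c1 a1 : Int)
    (hR : pvRULES.get? c = some [(alt1, c1, a1)])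
    (hrf : pvRulesFor c = [(alt1, c1, a1)])
    (hA : stepA d c = (replaceA d c alt1 c1 a1).map (fun l => d.insert c l))
    (hlt1 : ¬(c1 > 5 ∨ a1 > 5))
    (hpre : pvPreCol d c = true) :
    ∃ v, stepA d c = some (d.insert c v) ∧ stepB d c = some (d.insert c v) := by
  unfold pvPreCol at hpre
  cases hws : d.get? c with
  | none => rw [hws] at hpre; simp at hpre
  | some ws =>
    rw [hws] at hpre; dsimp only at hpre; rw [hrf] at hpre
    obtain ⟨alts, hmap, hlen, hokc⟩ := okRules_extract d _ ws.length hpre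
    have hmap' := hmap
    simp only [List.mapM_cons, List.mapM_nil] at hmap'
    cases hg1 : d.get? alt1 with
    | none => rw [hg1] at hmap'; simp at hmap'
    | some A1 =>
    rw [hg1] at hmap'
    have halts : alts = [A1] := by simpa using hmap'.symm
    subst halts
    obtain ⟨s, hs⟩ := seqApp_some _ [A1] ws hokc
    refine ⟨s, ?_, ?_⟩
    · rw [hA, chain1_eq d c alt1 c1 a1 ws A1 hlt1 hws hg1, hs]
      rfl
    · rw [stepB_eq d c _ [A1] ws hR rfl hmap hws, ← fusion _ _ ws hlen hokc, hs]
      rfl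

lemma step_target (d : PySem.Dict String (List String)) (c : String)
    (hc : c ∈ (["d", "e", "f", "g"] : List String)) (hpre : pvPreCol d c = true) :
    ∃ v, stepA d c = some (d.insert c v) ∧ stepB d c = some (d.insert c v) := by
  fin_cases hc
  · exact step3_core d "d" "c" "a" "a" 1 1 3 2 4 2 rfl rfl rfl (by decide) (by decide)
      (by decide) (by decide) (by decide) hpre
  · exact step3_core d "e" "a" "a" "a" 0 2 2 0 3 2 rfl rfl rfl (by decide) (by decide)
      (by decide) (by decide) (by decide) hpre
  · exact step1_core d "f" "a" 4 4 rfl rfl rfl (by decide) hpre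
  · exact step3_core d "g" "a" "a" "c" 0 0 1 2 2 1 rfl rfl rfl (by decide) (by decide)
      (by decide) (by decide) (by decide) hpre

lemma step_nontarget (d : PySem.Dict String (List String)) (c : String)
    (hc : c ∉ (["d", "e", "f", "g"] : List String)) :
    stepA d c = some d ∧ stepB d c = some d := by
  simp only [List.mem_cons, not_or] at hc
  obtain ⟨h1, h2, h3, h4, -⟩ := hc
  constructor
  · simp [stepA, h1, h2, h3, h4]
  · have : pvRULES.get? c = none := by
      simp [pvRULES, PySem.Dict.get?,
        Ne.symm h1, Ne.symm h2, Ne.symm h3, Ne.symm h4]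
    simp [stepB, this]

lemma fold_eq : ∀ (cols : List String) (d : PySem.Dict String (List String)), cols.Nodup →
    (∀ c ∈ cols, c ∈ (["d", "e", "f", "g"] : List String) → pvPreCol d c = true) →
    cols.foldl (fun od col => od.bind (fun d => stepA d col)) (some d) =
      cols.foldl (fun od col => od.bind (fun d => stepB d col)) (some d) := by
  intro cols
  induction cols with
  | nil => intro d _ _; rfl
  | cons c0 rest ih =>
    intro d hnd h
    have hnd' := hnd
    rw [List.nodup_cons] at hnd'
    obtain ⟨hc0, hrest⟩ := hnd'
    by_cases hct : c0 ∈ (["d", "e", "f", "g"] : List String)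
    · obtain ⟨v, hA, hB⟩ := step_target d c0 hct (h c0 (by simp) hct)
      simp only [List.foldl_cons, Option.bind_some, hA, hB]
      apply ih _ hrest
      intro c hcmem hctar
      rw [preCol_insert d c0 v c hctar (fun he => hc0 (he ▸ hcmem))
        (by fin_cases hct <;> decide) (by fin_cases hct <;> decide)]
      exact h c (by simp [hcmem]) hctar
    · obtain ⟨hA, hB⟩ := step_nontarget d c0 hct
      simp only [List.foldl_cons, Option.bind_some, hA, hB]
      exact ih d hrest (fun c hcmem hctar => h c (by simp [hcmem]) hctar)

-- ===== VERDICT (by name: the statement is the Claim_ definition above) =====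
theorem add_missing_data_spec : Claim_equal_add_missing_data := by
  intro words_ columns cols_with_data _ hpre
  unfold Spec_add_missing_data add_missing_data add_missing_data_alt
  rw [fold_eq]
  · exact ((PySem.List.sorted_perm _ _ _).nodup_iff).mpr
      (PySem.Set.nodup_diff _ _ (PySem.Set.nodup_ofList _))
  · intro c hcmem hct
    have hc' : c ∈ columns ∧ c ∉ cols_with_data := by
      have := (PySem.List.mem_sorted _ _ _ c).mp hcmem
      have h2 := (PySem.Set.mem_diff _ _ c).mp this
      exact ⟨(PySem.Set.mem_ofList _ c).mp h2.1, fun hx => h2.2 ((PySem.Set.mem_ofList _ c).mpr hx)⟩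
    exact hpre c hct hc'.1 hc'.2
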